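-- pv_equiv track=rewrite | github.com/PlayingNumbers/Astros_Analysis | astros_cheating.py | get_home_bs_hre
-- ===== SOURCE A (Python) =====
-- def get_home_bs_hre(plist):
--     away_bs = []
--     if plist[-1].startswith('Winning'):
--         plist = plist[:-1]
--     for i in plist[:-1][::-1]:
--         if len(i) <=2:
--             away_bs.append(i)
--         else:
--             return away_bs[::-1][-3:]
-- ===== SOURCE B (Python) =====
-- def get_home_bs_hre(plist):
--     if plist[-1].startswith('Winning'):
--         plist = plist[:-1]
--     body = plist[:-1]
--     idx = None
--     for j in range(len(body) - 1, -1, -1):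
--         if len(body[j]) > 2:
--             idx = j
--             break
--     if idx is None:
--         return None
--     return body[idx + 1:][-3:]
-- ===== Notes on version B (the rewrite author's own statement) =====
-- stated objective: alternative
-- what changed: B replaces A's backward accumulation loop (append each short token, reverse at the end) by first locating the index of the last token of length > 2 and then slicing body[idx+1:][-3:] from the original list.
-- outside the precondition, e.g. on get_home_bs_hre(['a', 'b']): A returns None, B returns None; on get_home_bs_hre([]): A raises IndexError, B raises IndexError
import Mathlib
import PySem

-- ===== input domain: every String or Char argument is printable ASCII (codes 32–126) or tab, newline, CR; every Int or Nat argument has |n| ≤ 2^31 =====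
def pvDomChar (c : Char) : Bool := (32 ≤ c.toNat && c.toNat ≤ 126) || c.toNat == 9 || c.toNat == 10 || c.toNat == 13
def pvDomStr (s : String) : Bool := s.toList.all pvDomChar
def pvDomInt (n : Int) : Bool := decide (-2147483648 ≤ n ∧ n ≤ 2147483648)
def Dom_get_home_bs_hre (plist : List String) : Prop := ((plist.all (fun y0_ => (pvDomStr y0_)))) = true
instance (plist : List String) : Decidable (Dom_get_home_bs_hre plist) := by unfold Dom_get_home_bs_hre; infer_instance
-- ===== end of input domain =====

-- B replaces A's accumulating backward loop by "find the index of the last long token, then slice"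
-- (different decomposition, same cost); equivalence is about the return value on Pre_ (A returns a list there).


-- ===== PORT A =====
-- the for-loop of A: iterate over the reversed list, accumulating short tokens;
-- on the first long token return away_bs[::-1][-3:]; fall-through ([] here) is Python's None, excluded by Pre_
def goA : List String → List String → List String
  | [], _away_bs => []
  | i :: rest, away_bs =>
    if PySem.Str.len i ≤ 2 then goA rest (away_bs ++ [i])
    else PySem.List.slice away_bs.reverse (some (-3)) none

def get_home_bs_hre (plist : List String) : List String :=
  match PySem.List.pyGet? plist (-1) with          -- plist[-1]; none = IndexError, excluded by Pre_
  | none => []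
  | some last =>
    let plist' := if PySem.Str.startswith last "Winning" then PySem.List.slice plist none (some (-1)) else plist
    goA (PySem.List.slice plist' none (some (-1))).reverse []   -- plist[:-1][::-1]

-- ===== PORT B =====
-- B's backward index scan: index of the LAST token with len > 2, none if there is none
def lastLongIdx : List String → Option Nat
  | [] => none
  | x :: rest =>
    match lastLongIdx rest with
    | some i => some (i + 1)
    | none => if 2 < PySem.Str.len x then some 0 else none

def get_home_bs_hre_alt (plist : List String) : List String :=
  match PySem.List.pyGet? plist (-1) with          -- plist[-1]; none = IndexError, excluded by Pre_
  | none => []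
  | some last =>
    let body := PySem.List.slice
      (if PySem.Str.startswith last "Winning" then PySem.List.slice plist none (some (-1)) else plist)
      none (some (-1))
    match lastLongIdx body with
    | none => []                                   -- Python B returns None here, excluded by Pre_
    | some idx => PySem.List.slice (PySem.List.slice body (some ((idx : Int) + 1)) none) (some (-3)) none

-- ===== PRECONDITION & SPEC =====
-- the body both programs scan: plist with a trailing 'Winning…' entry stripped, then without its last element
def pvBodyOf (plist : List String) : List String :=
  (if PySem.Str.startswith (plist.getLast?.getD "") "Winning" then plist.dropLast else plist).dropLast

-- Pre_ excludes [] (A raises IndexError) and the inputs whose scanned body contains no token of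
-- length > 2: there A falls through and returns None, which is not a value of the declared list type.
def Pre_get_home_bs_hre (plist : List String) : Prop :=
  plist ≠ [] ∧ ∃ x ∈ pvBodyOf plist, 2 < PySem.Str.len x
instance (plist : List String) : Decidable (Pre_get_home_bs_hre plist) := by
  unfold Pre_get_home_bs_hre; infer_instance

def pvWitness_get_home_bs_hre : List String := ["abc", "a", "b", "c", "d"]

def Spec_get_home_bs_hre (plist : List String) (out : List String) : Prop := out = get_home_bs_hre_alt plist
instance (plist : List String) (out : List String) : Decidable (Spec_get_home_bs_hre plist out) := by unfold Spec_get_home_bs_hre; infer_instance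

-- ===== CLAIM (what is proved, stated in full; the proofs are below) =====
def Claim_equal_get_home_bs_hre : Prop := ∀ (plist : List String), Dom_get_home_bs_hre plist → Pre_get_home_bs_hre plist → Spec_get_home_bs_hre plist (get_home_bs_hre plist)

-- ===== LEMMAS AND PROOFS =====

-- short-token predicate both scans test
def pvShort (s : String) : Bool := decide (PySem.Str.len s ≤ 2)

-- A's loop returns the last ≤3 of the short prefix of its (reversed) input, prefixed by the accumulator
theorem pvShort_iff (s : String) : pvShort s = true ↔ PySem.Str.len s ≤ 2 := by
  simp [pvShort]

theorem goA_eq (R acc : List String) (h : ∃ x ∈ R, ¬ PySem.Str.len x ≤ 2) :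
    goA R acc = PySem.List.slice ((acc ++ R.takeWhile pvShort).reverse) (some (-3)) none := by
  induction R generalizing acc with
  | nil => simp at h
  | cons i rest ih =>
    by_cases hi : PySem.Str.len i ≤ 2
    · have hrest : ∃ x ∈ rest, ¬ PySem.Str.len x ≤ 2 := by
        obtain ⟨x, hx, hlx⟩ := h
        rcases List.mem_cons.mp hx with hx | hx
        · exact absurd hi (hx ▸ hlx)
        · exact ⟨x, hx, hlx⟩
      simp only [goA, if_pos hi, ih _ hrest, List.takeWhile_cons]
      rw [if_pos ((pvShort_iff i).mpr hi)]
      simp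
    · simp only [goA, if_neg hi, List.takeWhile_cons]
      rw [if_neg (by rw [pvShort_iff]; exact hi)]
      simp

theorem lastLongIdx_none (L : List String) (h : lastLongIdx L = none) :
    ∀ x ∈ L, pvShort x := by
  induction L with
  | nil => simp
  | cons y rest ih =>
    intro x hx
    simp only [lastLongIdx] at h
    rcases hrest : lastLongIdx rest with _ | i
    · rw [hrest] at h
      have hy : ¬ 2 < PySem.Str.len y := by
        intro hy
        rw [PySem.Str.len_eq, String.length_toList] at hy
        simp at h
        omega
      rcases List.mem_cons.mp hx with hx | hx
      · subst hx
        rw [pvShort_iff]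
        omega
      · exact ih hrest x hx
    · rw [hrest] at h; simp at h

theorem lastLongIdx_some (L : List String) (h : ∃ x ∈ L, ¬ PySem.Str.len x ≤ 2) :
    ∃ n, lastLongIdx L = some n := by
  induction L with
  | nil => simp at h
  | cons y rest ih =>
    simp only [lastLongIdx]
    rcases hrest : lastLongIdx rest with _ | i
    · obtain ⟨x, hx, hlx⟩ := h
      rcases List.mem_cons.mp hx with hx | hx
      · exact ⟨0, by rw [if_pos (by subst hx; omega)]⟩
      · exact absurd ((pvShort_iff x).mp (lastLongIdx_none rest hrest x hx)) hlx
    · exact ⟨i + 1, rfl⟩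

theorem lastLongIdx_mem_long (L : List String) (n : Nat) (h : lastLongIdx L = some n) :
    ∃ x ∈ L, ¬ PySem.Str.len x ≤ 2 := by
  induction L generalizing n with
  | nil => simp [lastLongIdx] at h
  | cons y rest ih =>
    simp only [lastLongIdx] at h
    rcases hrest : lastLongIdx rest with _ | i
    · rw [hrest] at h
      split_ifs at h with hy
      exact ⟨y, by simp, by omega⟩
    · obtain ⟨x, hx, hlx⟩ := ih i hrest
      exact ⟨x, List.mem_cons_of_mem y hx, hlx⟩

-- B's slice from the last long index is the trailing short run = reverse of the short prefix of the reverse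
theorem drop_lastLongIdx (L : List String) (n : Nat) (h : lastLongIdx L = some n) :
    L.drop (n + 1) = (L.reverse.takeWhile pvShort).reverse := by
  induction L generalizing n with
  | nil => simp [lastLongIdx] at h
  | cons y rest ih =>
    simp only [lastLongIdx] at h
    rcases hrest : lastLongIdx rest with _ | i
    · rw [hrest] at h
      split_ifs at h with hy
      simp at h
      subst h
      have hall : ∀ x ∈ rest.reverse, pvShort x := by
        intro x hx
        exact lastLongIdx_none rest hrest x (List.mem_reverse.mp hx)
      simp only [List.reverse_cons, List.takeWhile_append_of_pos hall]
      have hyF : pvShort y = false := by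
        rcases Bool.eq_false_or_eq_true (pvShort y) with hb | hb
        · exact absurd ((pvShort_iff y).mp hb) (by omega)
        · exact hb
      have : (List.takeWhile pvShort [y]) = [] := by
        simp [hyF]
      simp [this]
    · rw [hrest] at h
      simp at h
      subst h
      have hlong := lastLongIdx_mem_long rest i hrest
      have hstop : rest.reverse.takeWhile pvShort = (rest.reverse ++ [y]).takeWhile pvShort := by
        obtain ⟨x, hx, hlx'⟩ := hlong
        have hxF : pvShort x = false := by
          rcases Bool.eq_false_or_eq_true (pvShort x) with hb | hb
          · exact absurd ((pvShort_iff x).mp hb) hlx'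
          · exact hb
        rw [List.takeWhile_append]
        split_ifs with hall
        · exfalso
          have hpre : (rest.reverse.takeWhile pvShort) = rest.reverse :=
            (List.takeWhile_prefix pvShort).eq_of_length (by simpa using hall)
          have := List.mem_takeWhile_imp (l := rest.reverse) (p := pvShort)
            (hpre ▸ List.mem_reverse.mpr hx)
          simp [hxF] at this
        · rfl
      simp only [List.reverse_cons, ← hstop]
      have := ih i hrest
      simpa using this

theorem main_eq (plist : List String) (h : Pre_get_home_bs_hre plist) :
    get_home_bs_hre plist = get_home_bs_hre_alt plist := by
  obtain ⟨hne, hlong⟩ := h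
  have hget : PySem.List.pyGet? plist (-1) = some (plist.getLast hne) := by
    rw [PySem.List.pyGet?_neg_ofNat plist 1 (by omega) (by simpa using List.length_pos_iff.mpr hne)]
    simp [List.getLast_eq_getElem]
  have hlastD : plist.getLast?.getD "" = plist.getLast hne := by
    simp [List.getLast?_eq_some_getLast hne]
  unfold get_home_bs_hre get_home_bs_hre_alt
  rw [hget]
  simp only [PySem.List.slice_to_neg_one]
  have hbody : ((if PySem.Str.startswith (plist.getLast hne) "Winning" then plist.dropLast else plist).dropLast)
      = pvBodyOf plist := by
    unfold pvBodyOf; rw [hlastD]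
  rw [hbody]
  have hlong' : ∃ x ∈ pvBodyOf plist, ¬ PySem.Str.len x ≤ 2 := by
    obtain ⟨x, hx, hlx⟩ := hlong; exact ⟨x, hx, by omega⟩
  obtain ⟨n, hn⟩ := lastLongIdx_some _ hlong'
  have hlongR : ∃ x ∈ (pvBodyOf plist).reverse, ¬ PySem.Str.len x ≤ 2 := by
    obtain ⟨x, hx, hlx⟩ := hlong'
    exact ⟨x, List.mem_reverse.mpr hx, hlx⟩
  rw [hn, goA_eq _ [] hlongR]
  have hslice : PySem.List.slice (pvBodyOf plist) (some ((n : Int) + 1)) none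
      = (pvBodyOf plist).drop (n + 1) := by
    have : ((n : Int) + 1) = ((n + 1 : Nat) : Int) := by push_cast; ring
    rw [this, PySem.List.slice_from_natCast]
  rw [drop_lastLongIdx _ n hn] at hslice
  simp [hslice]

-- ===== VERDICT (by name: the statement is the Claim_ definition above) =====
theorem get_home_bs_hre_spec : Claim_equal_get_home_bs_hre := by
  intro plist _ hpre
  unfold Spec_get_home_bs_hre
  exact main_eq plist hpre
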